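-- pv_equiv track=rewrite | github.com/SKNETWORKS-FAMILY-AICAMP/SKN21-FINAL-5TEAM | chatbot/src/onboarding_v2/engine.py | _normalize_required_rechecks
-- ===== SOURCE A (Python) =====
-- _STAGE_RECHECK_NAMES = ("analysis", "planning", "compile", "apply", "export", "indexing", "validation")
--
-- _CHECK_RECHECK_NAMES = (
--     "compile_preflight",
--     "backend_runtime_prep",
--     "backend_runtime_boot",
--     "chatbot_runtime_boot",
--     "widget_bundle_fetch",
--     "host_auth_bootstrap",
--     "chatbot_adapter_auth",
--     "widget_order_e2e",
--     "retrieval_faq",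
--     "retrieval_policy",
--     "retrieval_discovery_image",
--     "replay_apply",
--     "replay_validation",
-- )
--
-- def _normalize_required_rechecks(required_rechecks: list[str]) -> dict[str, list[str]]:
--     stage_rechecks: list[str] = []
--     check_rechecks: list[str] = []
--     ignored_rechecks: list[str] = []
--     seen_stage: set[str] = set()
--     seen_check: set[str] = set()
--     seen_ignored: set[str] = set()
--
--     for item in required_rechecks:
--         token = str(item or "").strip()
--         if not token:
--             continue
--         if token in _STAGE_RECHECK_NAMES:
--             if token not in seen_stage:
--                 seen_stage.add(token)
--                 stage_rechecks.append(token)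
--             continue
--         if token in _CHECK_RECHECK_NAMES:
--             if token not in seen_check:
--                 seen_check.add(token)
--                 check_rechecks.append(token)
--             continue
--         if token not in seen_ignored:
--             seen_ignored.add(token)
--             ignored_rechecks.append(token)
--
--     return {
--         "stage_rechecks": stage_rechecks,
--         "check_rechecks": check_rechecks,
--         "ignored_rechecks": ignored_rechecks,
--     }
-- ===== SOURCE B (Python) =====
-- _STAGE_RECHECK_NAMES = ("analysis", "planning", "compile", "apply", "export", "indexing", "validation")
--
-- _CHECK_RECHECK_NAMES = (
--     "compile_preflight",
--     "backend_runtime_prep",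
--     "backend_runtime_boot",
--     "chatbot_runtime_boot",
--     "widget_bundle_fetch",
--     "host_auth_bootstrap",
--     "chatbot_adapter_auth",
--     "widget_order_e2e",
--     "retrieval_faq",
--     "retrieval_policy",
--     "retrieval_discovery_image",
--     "replay_apply",
--     "replay_validation",
-- )
--
--
-- def _normalize_required_rechecks(required_rechecks: list[str]) -> dict[str, list[str]]:
--     # Clean everything once, then dedup globally (first occurrence wins); the
--     # three output lists are independent order-preserving filters of that list.
--     tokens = [t for t in (str(x or "").strip() for x in required_rechecks) if t]
--     uniq = list(dict.fromkeys(tokens))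
--     return {
--         "stage_rechecks": [t for t in uniq if t in _STAGE_RECHECK_NAMES],
--         "check_rechecks": [t for t in uniq if t in _CHECK_RECHECK_NAMES],
--         "ignored_rechecks": [t for t in uniq
--                              if t not in _STAGE_RECHECK_NAMES and t not in _CHECK_RECHECK_NAMES],
--     }
-- ===== Notes on version B (the rewrite author's own statement) =====
-- stated objective: simpler
-- what changed: Replaced the single branching partition loop with three seen-sets by one global clean+dedup pass (dict.fromkeys) followed by three independent order-preserving filters; correct because the stage/check name lists are disjoint, so per-bucket dedup equals global dedup.
import Mathlib
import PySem

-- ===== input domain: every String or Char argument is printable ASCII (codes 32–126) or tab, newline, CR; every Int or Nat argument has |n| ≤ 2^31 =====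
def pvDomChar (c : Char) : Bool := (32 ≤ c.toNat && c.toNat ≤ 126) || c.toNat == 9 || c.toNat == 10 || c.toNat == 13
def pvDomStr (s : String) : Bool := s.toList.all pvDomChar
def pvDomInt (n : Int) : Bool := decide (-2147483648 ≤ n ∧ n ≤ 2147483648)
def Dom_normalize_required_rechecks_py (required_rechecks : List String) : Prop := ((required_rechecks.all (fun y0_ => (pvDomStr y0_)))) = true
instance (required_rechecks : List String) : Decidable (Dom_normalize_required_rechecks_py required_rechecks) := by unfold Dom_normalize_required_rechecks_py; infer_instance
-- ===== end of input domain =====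

-- B replaces A's branching partition loop (three seen-sets) by one global clean+dedup pass
-- followed by three independent order-preserving filters (objective: simpler).


def pvStageNames : List String :=
  ["analysis", "planning", "compile", "apply", "export", "indexing", "validation"]

def pvCheckNames : List String :=
  ["compile_preflight", "backend_runtime_prep", "backend_runtime_boot", "chatbot_runtime_boot",
   "widget_bundle_fetch", "host_auth_bootstrap", "chatbot_adapter_auth", "widget_order_e2e",
   "retrieval_faq", "retrieval_policy", "retrieval_discovery_image", "replay_apply",
   "replay_validation"]

-- ===== PORT A =====
structure PvAState where
  stage : List String
  check : List String
  ignored : List String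
  seenS : PySem.Set String
  seenC : PySem.Set String
  seenI : PySem.Set String

-- token = str(item or "").strip()
def pvCleanA (item : String) : String := PySem.Str.strip (if item == "" then "" else item)

def pvAStep (s : PvAState) (item : String) : PvAState :=
  let token := pvCleanA item
  if token == "" then s
  else if pvStageNames.contains token then
    (if PySem.Set.contains s.seenS token then s
     else { s with seenS := PySem.Set.add s.seenS token, stage := s.stage ++ [token] })
  else if pvCheckNames.contains token then
    (if PySem.Set.contains s.seenC token then s
     else { s with seenC := PySem.Set.add s.seenC token, check := s.check ++ [token] })
  else
    (if PySem.Set.contains s.seenI token then s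
     else { s with seenI := PySem.Set.add s.seenI token, ignored := s.ignored ++ [token] })

def normalize_required_rechecks_py (required_rechecks : List String) : List (String × List String) :=
  let s := required_rechecks.foldl pvAStep
    ⟨[], [], [], PySem.Set.empty, PySem.Set.empty, PySem.Set.empty⟩
  [("stage_rechecks", s.stage), ("check_rechecks", s.check), ("ignored_rechecks", s.ignored)]

-- ===== PORT B =====
def pvCleanB (x : String) : String := PySem.Str.strip (if x == "" then "" else x)

def normalize_required_rechecks_py_alt (required_rechecks : List String) : List (String × List String) :=
  let tokens := (required_rechecks.map pvCleanB).filter (fun t => !(t == ""))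
  let uniq := PySem.List.dedup tokens
  [("stage_rechecks", uniq.filter (fun t => pvStageNames.contains t)),
   ("check_rechecks", uniq.filter (fun t => pvCheckNames.contains t)),
   ("ignored_rechecks", uniq.filter (fun t => !pvStageNames.contains t && !pvCheckNames.contains t))]

-- ===== PRECONDITION & SPEC =====
def Spec_normalize_required_rechecks_py (required_rechecks : List String) (out : List (String × List String)) : Prop := out = normalize_required_rechecks_py_alt required_rechecks
instance (required_rechecks : List String) (out : List (String × List String)) : Decidable (Spec_normalize_required_rechecks_py required_rechecks out) := by unfold Spec_normalize_required_rechecks_py; infer_instance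

-- ===== CLAIM (what is proved, stated in full; the proofs are below) =====
def Claim_equal_normalize_required_rechecks_py : Prop := ∀ (required_rechecks : List String), Dom_normalize_required_rechecks_py required_rechecks → Spec_normalize_required_rechecks_py required_rechecks (normalize_required_rechecks_py required_rechecks)

-- ===== LEMMAS AND PROOFS =====
def pvFS (t : String) : Bool := pvStageNames.contains t
def pvFC (t : String) : Bool := !pvStageNames.contains t && pvCheckNames.contains t
def pvFI (t : String) : Bool := !pvStageNames.contains t && !pvCheckNames.contains t

def pvStateOf (u : List String) : PvAState :=
  ⟨u.filter pvFS, u.filter pvFC, u.filter pvFI, u.filter pvFS, u.filter pvFC, u.filter pvFI⟩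

-- the clean+dedup step on one element
def pvBStep (acc : List String) (x : String) : List String :=
  let t := pvCleanB x
  if t == "" then acc else PySem.Set.add acc t

-- disjointness of the two name lists: check-membership already excludes stage-membership
lemma pvDisjC (t : String) : pvFC t = pvCheckNames.contains t := by
  unfold pvFC
  cases h : pvCheckNames.contains t with
  | false => simp
  | true =>
    have hm : t ∈ pvCheckNames := by simpa using h
    have hs : pvStageNames.contains t = false := by fin_cases hm <;> decide
    rw [hs]; rfl

lemma pvA_loop (rs : List String) (u : List String) :
    rs.foldl pvAStep (pvStateOf u) = pvStateOf (rs.foldl pvBStep u) := by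
  induction rs generalizing u with
  | nil => rfl
  | cons x rs ih =>
    simp only [List.foldl_cons]
    have hstep : pvAStep (pvStateOf u) x = pvStateOf (pvBStep u x) := by
      unfold pvAStep pvBStep
      set t := pvCleanA x with ht
      have htB : pvCleanB x = t := rfl
      by_cases h0 : (t == "") = true
      · simp [htB, h0]
      · simp only [htB, h0, Bool.false_eq_true, if_false]
        by_cases hS : pvStageNames.contains t = true
        · have hSm : t ∈ pvStageNames := by simpa using hS
          have hfs : pvFS t = true := hS
          have hfc : pvFC t = false := by unfold pvFC; rw [hS]; rfl
          have hfi : pvFI t = false := by unfold pvFI; rw [hS]; rfl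
          by_cases hmem : t ∈ u
          · simp [pvStateOf, hSm, hmem, hfs, PySem.Set.add_of_mem hmem]
          · have hadd : PySem.Set.add u t = u ++ [t] := PySem.Set.add_of_not_mem hmem
            have haddS : PySem.Set.add (u.filter pvFS) t = u.filter pvFS ++ [t] :=
              PySem.Set.add_of_not_mem (by simp [List.mem_filter, hmem])
            simp [pvStateOf, hSm, hmem, hfs, hadd, haddS, List.filter_append, hfc, hfi]
        · have hS' : pvStageNames.contains t = false := Bool.eq_false_iff.mpr hS
          have hSm : t ∉ pvStageNames := by simpa using hS'
          have hfs : pvFS t = false := hS'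
          by_cases hC : pvCheckNames.contains t = true
          · have hCm : t ∈ pvCheckNames := by simpa using hC
            have hfc : pvFC t = true := by unfold pvFC; rw [hS', hC]; rfl
            have hfi : pvFI t = false := by unfold pvFI; rw [hC]; simp
            by_cases hmem : t ∈ u
            · simp [pvStateOf, hSm, hCm, hmem, hfc, PySem.Set.add_of_mem hmem]
            · have hadd : PySem.Set.add u t = u ++ [t] := PySem.Set.add_of_not_mem hmem
              have haddC : PySem.Set.add (u.filter pvFC) t = u.filter pvFC ++ [t] :=
                PySem.Set.add_of_not_mem (by simp [List.mem_filter, hmem])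
              simp [pvStateOf, hSm, hCm, hmem, hfc, hadd, haddC, List.filter_append, hfs, hfi]
          · have hC' : pvCheckNames.contains t = false := Bool.eq_false_iff.mpr hC
            have hCm : t ∉ pvCheckNames := by simpa using hC'
            have hfc : pvFC t = false := by unfold pvFC; rw [hC']; simp
            have hfi : pvFI t = true := by unfold pvFI; rw [hS', hC']; rfl
            by_cases hmem : t ∈ u
            · simp [pvStateOf, hSm, hCm, hmem, hfi, PySem.Set.add_of_mem hmem]
            · have hadd : PySem.Set.add u t = u ++ [t] := PySem.Set.add_of_not_mem hmem
              have haddI : PySem.Set.add (u.filter pvFI) t = u.filter pvFI ++ [t] :=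
                PySem.Set.add_of_not_mem (by simp [List.mem_filter, hmem])
              simp [pvStateOf, hSm, hCm, hmem, hfi, hadd, haddI, List.filter_append, hfs, hfc]
    rw [hstep, ih]

-- B's clean+filter+dedup pipeline, re-read as the single fold pvBStep
lemma pvB_pipeline (rs : List String) (u : List String) :
    ((rs.map pvCleanB).filter (fun t => !(t == ""))).foldl PySem.Set.add u
      = rs.foldl pvBStep u := by
  induction rs generalizing u with
  | nil => rfl
  | cons x rs ih =>
    by_cases h0 : (pvCleanB x == "") = true
    · have hb : pvBStep u x = u := by simp [pvBStep, h0]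
      simp only [List.map_cons, List.filter_cons, h0, Bool.not_true, Bool.false_eq_true,
        if_false, List.foldl_cons, hb]
      exact ih u
    · have h0' : (pvCleanB x == "") = false := Bool.eq_false_iff.mpr h0
      have hb : pvBStep u x = PySem.Set.add u (pvCleanB x) := by simp [pvBStep, h0']
      simp only [List.map_cons, List.filter_cons, h0', Bool.not_false, if_true,
        List.foldl_cons, hb]
      exact ih _

-- ===== VERDICT (by name: the statement is the Claim_ definition above) =====
theorem normalize_required_rechecks_py_spec : Claim_equal_normalize_required_rechecks_py := by
  intro rs _
  unfold Spec_normalize_required_rechecks_py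
  unfold normalize_required_rechecks_py normalize_required_rechecks_py_alt
  have hinit : (⟨[], [], [], PySem.Set.empty, PySem.Set.empty, PySem.Set.empty⟩ : PvAState)
      = pvStateOf [] := rfl
  rw [hinit, pvA_loop]
  have huniq : PySem.List.dedup ((rs.map pvCleanB).filter (fun t => !(t == "")))
      = rs.foldl pvBStep [] := by
    rw [PySem.List.dedup_eq_ofList, PySem.Set.ofList_eq_foldl, pvB_pipeline]
  simp only [← huniq]
  set u := PySem.List.dedup ((rs.map pvCleanB).filter (fun t => !(t == "")))
  have hS : u.filter pvFS = u.filter (fun t => pvStageNames.contains t) := rfl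
  have hC : u.filter pvFC = u.filter (fun t => pvCheckNames.contains t) := by
    apply List.filter_congr; intro t _; exact pvDisjC t
  have hI : u.filter pvFI
      = u.filter (fun t => !pvStageNames.contains t && !pvCheckNames.contains t) := rfl
  simp only [pvStateOf]
  rw [hS, hC, hI]
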